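-- pv_equiv track=rewrite | github.com/animicaorg/all | pq/py/utils/bech32.py | bech32_encode
-- ===== SOURCE A (Python) =====
-- from typing import Iterable, List, Sequence, Tuple
--
-- CHARSET = "qpzry9x8gf2tvdw0s3jn54khce6mua7l"
--
-- _BECH32_CONST = 1
--
-- _BECH32M_CONST = 0x2BC830A3
--
-- class Bech32Error(ValueError):
--     pass
--
-- def _polymod(values: Sequence[int]) -> int:
--     """Internal: Compute Bech32 checksum polymod."""
--     # generator coefficients
--     GENERATORS = (0x3B6A57B2, 0x26508E6D, 0x1EA119FA, 0x3D4233DD, 0x2A1462B3)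
--     chk = 1
--     for v in values:
--         if v < 0 or v > 31:
--             raise Bech32Error("polymod values must be 5-bit")
--         top = chk >> 25
--         chk = ((chk & 0x1FFFFFF) << 5) ^ v
--         for i in range(5):
--             if (top >> i) & 1:
--                 chk ^= GENERATORS[i]
--     return chk
--
-- def _hrp_expand(hrp: str) -> List[int]:
--     """Expand HRP for checksum computation."""
--     return [ord(x) >> 5 for x in hrp] + [0] + [ord(x) & 31 for x in hrp]
--
-- def _create_checksum(hrp: str, data: Sequence[int], bech32m: bool) -> List[int]:
--     const = _BECH32M_CONST if bech32m else _BECH32_CONST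
--     values = _hrp_expand(hrp) + list(data)
--     polymod = _polymod(values + [0, 0, 0, 0, 0, 0]) ^ const
--     return [(polymod >> 5 * (5 - i)) & 31 for i in range(6)]
--
-- def bech32_encode(hrp: str, data: Sequence[int], spec: str = "bech32m") -> str:
--     """
--     Encode HRP + 5-bit data words into a Bech32/Bech32m string.
--     `spec` must be "bech32" or "bech32m".
--     """
--     if not hrp or any((ord(c) < 33 or ord(c) > 126) for c in hrp):
--         raise Bech32Error("invalid HRP characters")
--     if any(d < 0 or d > 31 for d in data):
--         raise Bech32Error("data values must be 5-bit (0..31)")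
--     if spec not in ("bech32", "bech32m"):
--         raise Bech32Error("spec must be 'bech32' or 'bech32m'")
--
--     # Enforce lowercase output.
--     hrp = hrp.lower()
--     bech32m = spec == "bech32m"
--     checksum = _create_checksum(hrp, data, bech32m)
--     combined = list(data) + checksum
--     return hrp + "1" + "".join(CHARSET[d] for d in combined)
-- ===== SOURCE B (Python) =====
-- CHARSET = "qpzry9x8gf2tvdw0s3jn54khce6mua7l"
--
-- _BECH32_CONST = 1
--
-- _BECH32M_CONST = 0x2BC830A3
--
--
-- class Bech32Error(ValueError):
--     pass
--
--
-- def _make_gf_tables():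
--     """Discrete log/antilog tables for GF(32) with reduction polynomial x^5 + x^3 + 1."""
--     exp = [0] * 31
--     log = [0] * 32
--     e = 1
--     for i in range(31):
--         exp[i] = e
--         log[e] = i
--         e <<= 1
--         if e & 32:
--             e ^= 41
--     return exp, log
--
--
-- _GF_EXP, _GF_LOG = _make_gf_tables()
--
-- # Coefficients of x^6 mod g(x) for the Bech32 generator polynomial g, as GF(32) symbols.
-- _GEN_SYMS = [29, 22, 20, 21, 29, 18]
--
--
-- def _gf_mul(a, b):
--     if a == 0 or b == 0:
--         return 0
--     return _GF_EXP[(_GF_LOG[a] + _GF_LOG[b]) % 31]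
--
--
-- def _polymod_gf(values):
--     """Checksum as BCH polynomial remainder over GF(32): a 6-symbol shift register."""
--     reg = [0, 0, 0, 0, 0, 1]
--     for v in values:
--         if v < 0 or v > 31:
--             raise Bech32Error("polymod values must be 5-bit")
--         e = reg[0]
--         reg = [r ^ _gf_mul(e, g) for r, g in zip(reg[1:] + [v], _GEN_SYMS)]
--     return reg
--
--
-- def bech32_encode(hrp, data, spec="bech32m"):
--     if not hrp or any(ord(c) < 33 or ord(c) > 126 for c in hrp):
--         raise Bech32Error("invalid HRP characters")
--     if any(d < 0 or d > 31 for d in data):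
--         raise Bech32Error("data values must be 5-bit (0..31)")
--     if spec not in ("bech32", "bech32m"):
--         raise Bech32Error("spec must be 'bech32' or 'bech32m'")
--
--     hrp = hrp.lower()
--     bs = [ord(c) for c in hrp]
--     values = [b >> 5 for b in bs] + [0] + [b & 31 for b in bs] + list(data) + [0] * 6
--     const = _BECH32M_CONST if spec == "bech32m" else _BECH32_CONST
--     reg = _polymod_gf(values)
--     checksum = [r ^ ((const >> 5 * (5 - i)) & 31) for i, r in enumerate(reg)]
--     return hrp + "1" + "".join(CHARSET[d] for d in list(data) + checksum)
-- ===== Notes on version B (the rewrite author's own statement) =====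
-- stated objective: alternative
-- what changed: B computes the checksum as a BCH polynomial remainder over GF(32): it keeps a list of six 5-bit field symbols as the shift register and multiplies by the generator coefficients with discrete log/antilog field tables, instead of A's packed 30-bit integer LFSR whose inner loop bit-tests the top symbol and XORs five packed generator constants.
import Mathlib
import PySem

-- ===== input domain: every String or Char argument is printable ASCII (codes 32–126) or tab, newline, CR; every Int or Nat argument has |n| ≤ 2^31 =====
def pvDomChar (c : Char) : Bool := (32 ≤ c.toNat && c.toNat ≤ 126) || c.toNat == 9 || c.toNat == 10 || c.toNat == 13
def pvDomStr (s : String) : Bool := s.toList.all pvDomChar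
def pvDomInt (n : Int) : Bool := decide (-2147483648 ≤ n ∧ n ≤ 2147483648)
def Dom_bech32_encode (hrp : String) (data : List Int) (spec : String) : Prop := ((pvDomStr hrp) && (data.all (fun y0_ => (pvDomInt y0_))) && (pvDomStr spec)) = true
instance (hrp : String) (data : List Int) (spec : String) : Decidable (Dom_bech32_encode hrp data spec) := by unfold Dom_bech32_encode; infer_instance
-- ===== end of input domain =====

set_option maxRecDepth 8000


-- B computes the Bech32 checksum as a BCH polynomial remainder over GF(32): a 6-symbol shift
-- register with field multiplication via discrete log/antilog tables, instead of A's packed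
-- 30-bit integer LFSR with bit-tested XORs of generator constants; same return value on Pre_
-- (the inputs where the Python A returns instead of raising).

-- ===== PORT A =====
def pvCharsetL : List Char := "qpzry9x8gf2tvdw0s3jn54khce6mua7l".toList

def pvGENERATORS : List Int := [0x3B6A57B2, 0x26508E6D, 0x1EA119FA, 0x3D4233DD, 0x2A1462B3]

-- _polymod; its 'raise' for v outside 0..31 never fires under bech32_encode's own validation
-- (outside Pre_ nothing is claimed)
def pvPolymod (values : List Int) : Int :=
  values.foldl (fun chk v =>
    let top := chk >>> (25 : Nat)
    let chk1 := PySem.Int.bxor ((PySem.Int.band chk 0x1FFFFFF) <<< (5 : Nat)) v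
    (List.range 5).foldl
      (fun (c : Int) (i : Nat) => if PySem.Int.band (top >>> i) 1 = 1 then PySem.Int.bxor c (PySem.List.pyGetD pvGENERATORS (i : Int) 0) else c)
      chk1) 1

def pvHrpExpand (hrp : String) : List Int :=
  hrp.toList.map (fun x => ((x.toNat : Int)) >>> (5 : Nat)) ++ [0] ++ hrp.toList.map (fun x => PySem.Int.band (x.toNat : Int) 31)

def pvCreateChecksum (hrp : String) (data : List Int) (bech32m : Bool) : List Int :=
  let const : Int := if bech32m then 0x2BC830A3 else 1
  let values := pvHrpExpand hrp ++ data
  let polymod := PySem.Int.bxor (pvPolymod (values ++ [0, 0, 0, 0, 0, 0])) const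
  (List.range 6).map (fun i => PySem.Int.band (polymod >>> ((5 * (5 - i) : Nat))) 31)

def bech32_encode (hrp : String) (data : List Int) (spec : String) : String :=
  if hrp.toList = [] ∨ hrp.toList.any (fun c => decide (c.toNat < 33) || decide (126 < c.toNat)) then ""  -- Python raises here (outside Pre_)
  else if data.any (fun d => decide (d < 0) || decide (31 < d)) then ""                                   -- Python raises here (outside Pre_)
  else if ¬(spec = "bech32" ∨ spec = "bech32m") then ""                                                   -- Python raises here (outside Pre_)
  else
    let hrpL := PySem.Str.lower hrp
    let bech32m := spec = "bech32m"
    let checksum := pvCreateChecksum hrpL data bech32m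
    let combined := data ++ checksum
    String.mk (hrpL.toList ++ ['1'] ++ combined.map (fun d => PySem.List.pyGetD pvCharsetL d ' '))

-- ===== PORT B =====
def pvCharsetB : List Char := "qpzry9x8gf2tvdw0s3jn54khce6mua7l".toList

-- _make_gf_tables: discrete log/antilog tables for GF(32), reduction polynomial x^5 + x^3 + 1
def pvGfTables : List Int × List Int :=
  let st := (PySem.List.pyRange 0 31 1).foldl
    (fun (st : List Int × List Int × Int) (i : Int) =>
      let exp := PySem.List.pySetD st.1 i st.2.2
      let log := PySem.List.pySetD st.2.1 st.2.2 i
      let e := st.2.2 <<< (1 : Nat)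
      (exp, log, if PySem.Int.band e 32 ≠ 0 then PySem.Int.bxor e 41 else e))
    (List.replicate 31 0, List.replicate 32 0, 1)
  (st.1, st.2.1)

def pvGfExp : List Int := pvGfTables.1
def pvGfLog : List Int := pvGfTables.2

-- coefficients of x^6 mod g(x) as GF(32) symbols
def pvGenSymsB : List Int := [29, 22, 20, 21, 29, 18]

def pvGfMul (a b : Int) : Int :=
  if a = 0 ∨ b = 0 then 0
  else PySem.List.pyGetD pvGfExp (PySem.Int.mod (PySem.List.pyGetD pvGfLog a 0 + PySem.List.pyGetD pvGfLog b 0) 31) 0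

-- one step of the shift register (the body of _polymod_gf's loop)
def pvGfStep (reg : List Int) (v : Int) : List Int :=
  let e := PySem.List.pyGetD reg 0 0
  ((PySem.List.slice reg (some 1) none ++ [v]).zip pvGenSymsB).map
    (fun rg => PySem.Int.bxor rg.1 (pvGfMul e rg.2))

-- _polymod_gf; its 'raise' never fires under bech32_encode's own validation (outside Pre_)
def pvPolymodGf (values : List Int) : List Int :=
  values.foldl pvGfStep [0, 0, 0, 0, 0, 1]

def bech32_encode_alt (hrp : String) (data : List Int) (spec : String) : String :=
  if hrp.toList = [] ∨ hrp.toList.any (fun c => decide (c.toNat < 33) || decide (126 < c.toNat)) then ""  -- Python raises here (outside Pre_)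
  else if data.any (fun d => decide (d < 0) || decide (31 < d)) then ""                                   -- Python raises here (outside Pre_)
  else if ¬(spec = "bech32" ∨ spec = "bech32m") then ""                                                   -- Python raises here (outside Pre_)
  else
    let hl := (PySem.Str.lower hrp).toList
    let bs := hl.map (fun c => (c.toNat : Int))
    let values := bs.map (fun b : Int => b >>> (5 : Nat)) ++ [(0 : Int)] ++ bs.map (fun b => PySem.Int.band b 31) ++ data ++ List.replicate 6 (0 : Int)
    let const : Int := if spec = "bech32m" then 0x2BC830A3 else 1
    let reg := pvPolymodGf values
    -- enumerate index i ranges over 0..5, so (5*(5-i)).toNat is exact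
    let checksum := (PySem.List.enumerate reg 0).map
      (fun ir => PySem.Int.bxor ir.2 (PySem.Int.band (const >>> ((5 * (5 - ir.1)).toNat)) 31))
    String.mk (hl ++ ['1'] ++ (data ++ checksum).map (fun d => PySem.List.pyGetD pvCharsetB d ' '))

-- ===== PRECONDITION & SPEC =====
-- Pre_ excludes exactly the inputs on which the Python A raises Bech32Error: empty HRP, an HRP
-- character outside codes 33..126, a data value outside 0..31, or a spec other than
-- "bech32"/"bech32m".  B raises there too.
def Pre_bech32_encode (hrp : String) (data : List Int) (spec : String) : Prop :=
  hrp.toList ≠ [] ∧ hrp.toList.all (fun c => decide (33 ≤ c.toNat) && decide (c.toNat ≤ 126)) = true ∧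
  data.all (fun d => decide (0 ≤ d) && decide (d ≤ 31)) = true ∧ (spec = "bech32" ∨ spec = "bech32m")
instance (hrp : String) (data : List Int) (spec : String) : Decidable (Pre_bech32_encode hrp data spec) := by unfold Pre_bech32_encode; infer_instance

def pvWitness_bech32_encode : String × List Int × String := ("bc", [0, 1, 31], "bech32m")

def Spec_bech32_encode (hrp : String) (data : List Int) (spec : String) (out : String) : Prop := out = bech32_encode_alt hrp data spec
instance (hrp : String) (data : List Int) (spec : String) (out : String) : Decidable (Spec_bech32_encode hrp data spec out) := by unfold Spec_bech32_encode; infer_instance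

-- ===== CLAIM (what is proved, stated in full; the proofs are below) =====
def Claim_equal_bech32_encode : Prop := ∀ (hrp : String) (data : List Int) (spec : String), Dom_bech32_encode hrp data spec → Pre_bech32_encode hrp data spec → Spec_bech32_encode hrp data spec (bech32_encode hrp data spec)

-- ===== LEMMAS AND PROOFS =====

-- Nat-level model of the inner generator loop of A's _polymod
def natGens : List Nat := [0x3B6A57B2, 0x26508E6D, 0x1EA119FA, 0x3D4233DD, 0x2A1462B3]
def innerN (t b : Nat) : Nat :=
  (List.range 5).foldl (fun c i => if (t >>> i) &&& 1 = 1 then c ^^^ natGens.getD i 0 else c) b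

-- k-th 5-bit symbol of a packed 30-bit checksum (k = 0 is the top symbol)
def symN (n k : Nat) : Nat := (n >>> (5 * (5 - k))) &&& 31

-- Nat-level model of one step of A's _polymod
def stepN (n m : Nat) : Nat := (((n &&& 0x1FFFFFF) <<< 5) ^^^ m) ^^^ innerN (n >>> 25) 0

-- the 6-symbol register that corresponds to a packed checksum n
def regOf (n : Nat) : List Int :=
  [((symN n 0 : Nat) : Int), ((symN n 1 : Nat) : Int), ((symN n 2 : Nat) : Int),
   ((symN n 3 : Nat) : Int), ((symN n 4 : Nat) : Int), ((symN n 5 : Nat) : Int)]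

lemma foldl_xor_out (l : List Nat) (P : Nat → Prop) [DecidablePred P] (g : Nat → Nat) (b : Nat) :
    l.foldl (fun c i => if P i then c ^^^ g i else c) b
      = b ^^^ l.foldl (fun c i => if P i then c ^^^ g i else c) 0 := by
  induction l generalizing b with
  | nil => simp
  | cons i l ih =>
    simp only [List.foldl_cons]
    rw [ih (if P i then b ^^^ g i else b), ih (if P i then 0 ^^^ g i else 0)]
    by_cases h : P i <;> simp [h, Nat.xor_assoc]

lemma foldl_bxor_cast (l : List Nat) (PI : Nat → Prop) [DecidablePred PI] (PN : Nat → Prop) [DecidablePred PN]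
    (hP : ∀ i, PI i ↔ PN i) (gI : Nat → Int) (gN : Nat → Nat) (hg : ∀ i, gI i = ((gN i : Nat) : Int)) (b : Nat) :
    l.foldl (fun c i => if PI i then PySem.Int.bxor c (gI i) else c) ((b : Nat) : Int)
      = ((l.foldl (fun c i => if PN i then c ^^^ gN i else c) b : Nat) : Int) := by
  induction l generalizing b with
  | nil => rfl
  | cons i l ih =>
    simp only [List.foldl_cons]
    by_cases h : PN i
    · rw [if_pos ((hP i).mpr h), if_pos h, hg i, PySem.Int.bxor_natCast, ih]
    · rw [if_neg (fun hpi => h ((hP i).mp hpi)), if_neg h, ih]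

lemma gens_cast : ∀ i : Nat, PySem.List.pyGetD pvGENERATORS (i : Int) 0 = ((natGens.getD i 0 : Nat) : Int) := by
  intro i
  rw [PySem.List.pyGetD_natCast]
  rcases i with _ | _ | _ | _ | _ | i <;> rfl

lemma cond_cast (t : Nat) : ∀ i : Nat, (PySem.Int.band (((t : Nat) : Int) >>> i) 1 = 1) ↔ ((t >>> i) &&& 1 = 1) := by
  intro i
  rw [← Int.natCast_shiftRight, show (1 : Int) = ((1 : Nat) : Int) from rfl, PySem.Int.band_natCast]
  exact Nat.cast_inj

lemma inner_bound : ∀ t ∈ List.range 32, innerN t 0 < 2 ^ 30 := by decide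

-- one step of A's packed fold computes stepN and stays below 2^30
lemma stepA_eq (n m : Nat) (hn : n < 2 ^ 30) (hm : m ≤ 31) :
    stepN n m < 2 ^ 30 ∧
      ((List.range 5).foldl
        (fun (c : Int) (i : Nat) => if PySem.Int.band ((((n : Nat) : Int) >>> (25 : Nat)) >>> i) 1 = 1 then PySem.Int.bxor c (PySem.List.pyGetD pvGENERATORS (i : Int) 0) else c)
        (PySem.Int.bxor ((PySem.Int.band ((n : Nat) : Int) 0x1FFFFFF) <<< (5 : Nat)) ((m : Nat) : Int)) = ((stepN n m : Nat) : Int)) := by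
  have ht : n >>> 25 < 32 := by rw [Nat.shiftRight_eq_div_pow]; omega
  have htm : n >>> 25 ∈ List.range 32 := List.mem_range.mpr ht
  have hband : PySem.Int.band ((n : Nat) : Int) 0x1FFFFFF = (((n &&& 0x1FFFFFF : Nat)) : Int) := by
    rw [show (0x1FFFFFF : Int) = (((0x1FFFFFF : Nat)) : Int) from rfl, PySem.Int.band_natCast]
  have hbase : PySem.Int.bxor ((PySem.Int.band ((n : Nat) : Int) 0x1FFFFFF) <<< (5 : Nat)) ((m : Nat) : Int)
      = ((((n &&& 0x1FFFFFF) <<< 5) ^^^ m : Nat) : Int) := by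
    rw [hband, ← Int.natCast_shiftLeft, PySem.Int.bxor_natCast]
  have hbb : ((n &&& 0x1FFFFFF) <<< 5) ^^^ m < 2 ^ 30 := by
    have h1 : n &&& 0x1FFFFFF ≤ 0x1FFFFFF := Nat.and_le_right
    have h2 : (n &&& 0x1FFFFFF) <<< 5 = (n &&& 0x1FFFFFF) * 2 ^ 5 := Nat.shiftLeft_eq _ 5
    exact Nat.xor_lt_two_pow (by omega) (by omega)
  refine ⟨Nat.xor_lt_two_pow hbb (inner_bound _ htm), ?_⟩
  rw [← Int.natCast_shiftRight, hbase]
  have hfold : (List.range 5).foldl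
      (fun (c : Int) (i : Nat) => if PySem.Int.band ((((n >>> 25 : Nat) : Int)) >>> i) 1 = 1 then PySem.Int.bxor c (PySem.List.pyGetD pvGENERATORS (i : Int) 0) else c)
      ((((((n &&& 0x1FFFFFF) <<< 5) ^^^ m : Nat)) : Int))
      = ((innerN (n >>> 25) (((n &&& 0x1FFFFFF) <<< 5) ^^^ m) : Nat) : Int) :=
    foldl_bxor_cast _ _ _ (cond_cast (n >>> 25)) _ _ gens_cast _
  rw [hfold]
  have hout : innerN (n >>> 25) (((n &&& 0x1FFFFFF) <<< 5) ^^^ m)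
      = (((n &&& 0x1FFFFFF) <<< 5) ^^^ m) ^^^ innerN (n >>> 25) 0 :=
    foldl_xor_out _ _ _ _
  rw [hout]
  rfl

-- XOR distributes through symbol extraction
lemma chunk_xor (a b s : Nat) : ((a ^^^ b) >>> s) &&& 31 = ((a >>> s) &&& 31) ^^^ ((b >>> s) &&& 31) := by
  rw [Nat.shiftRight_xor_distrib, Nat.and_xor_distrib_right]

lemma symN_xor (a b k : Nat) : symN (a ^^^ b) k = symN a k ^^^ symN b k := chunk_xor a b _

lemma symN_lt (n k : Nat) : symN n k < 32 :=
  Nat.lt_of_le_of_lt (Nat.and_le_right) (by norm_num)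

-- shifting in a fresh 5-bit symbol: (x <<< 5) ^^^ m = 32*x + m
lemma xor_low (x m : Nat) (hm : m < 32) : (x <<< 5) ^^^ m = 32 * x + m := by
  have h32 : 32 * x + m = 2 ^ 5 * x + m := by ring_nf
  rw [h32]
  apply Nat.eq_of_testBit_eq
  intro j
  rw [Nat.testBit_xor, Nat.testBit_shiftLeft, Nat.testBit_two_pow_mul_add x (show m < 2 ^ 5 by omega) j]
  by_cases hj : j < 5
  · simp [hj, Nat.not_le.mpr hj]
  · have hmj : m.testBit j = false := Nat.testBit_lt_two_pow (by
      calc m < 32 := hm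
        _ = 2 ^ 5 := by norm_num
        _ ≤ 2 ^ j := Nat.pow_le_pow_right (by norm_num) (by omega))
    simp [hj, Nat.le_of_not_lt hj, hmj]

-- the symbols of the shifted-in base value
lemma and31 (x : Nat) : x &&& 31 = x % 32 := by
  have h := Nat.and_two_pow_sub_one_eq_mod x 5
  norm_num at h
  exact h

lemma and25 (x : Nat) : x &&& 0x1FFFFFF = x % 0x2000000 := by
  have h := Nat.and_two_pow_sub_one_eq_mod x 25
  norm_num at h
  exact h

-- the symbols of the shifted-in base value
lemma symN_base (n m k : Nat) (hm : m < 32) (hk : k < 6) :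
    symN (((n &&& 0x1FFFFFF) <<< 5) ^^^ m) k = if k = 5 then m else symN n (k + 1) := by
  rw [xor_low _ m hm]
  unfold symN
  rw [Nat.shiftRight_eq_div_pow, Nat.shiftRight_eq_div_pow, and31, and31, and25]
  interval_cases k <;> norm_num <;> omega

lemma symN_top (n : Nat) (hn : n < 2 ^ 30) : n >>> 25 = symN n 0 := by
  unfold symN
  rw [Nat.shiftRight_eq_div_pow, and31]
  norm_num at hn ⊢
  omega

-- B's GF(32) multiply against the generator symbols agrees with A's bit-tested feedback XOR
lemma gfmul_table : ∀ t ∈ List.range 32, ∀ k ∈ List.range 6,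
    pvGfMul ((t : Nat) : Int) (pvGenSymsB.getD k 0) = ((symN (innerN t 0) k : Nat) : Int) := by decide

-- one component of B's register step
lemma comp_eq (n m k : Nat) (hn : n < 2 ^ 30) (hm : m < 32) (hk : k < 6) :
    PySem.Int.bxor (if k = 5 then ((m : Nat) : Int) else ((symN n (k + 1) : Nat) : Int))
        (pvGfMul ((symN n 0 : Nat) : Int) (pvGenSymsB.getD k 0))
      = ((symN (stepN n m) k : Nat) : Int) := by
  have ht : symN n 0 ∈ List.range 32 := List.mem_range.mpr (symN_lt n 0)
  have hk6 : k ∈ List.range 6 := List.mem_range.mpr hk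
  rw [gfmul_table _ ht _ hk6]
  have hstep : symN (stepN n m) k = (if k = 5 then m else symN n (k + 1)) ^^^ symN (innerN (symN n 0) 0) k := by
    unfold stepN
    rw [symN_xor, symN_base n m k hm hk, symN_top n hn]
  rw [hstep]
  by_cases h5 : k = 5 <;> simp [h5, PySem.Int.bxor_natCast]

-- one step of B's register fold tracks stepN
lemma stepB_eq (n m : Nat) (hn : n < 2 ^ 30) (hm : m < 32) :
    pvGfStep (regOf n) ((m : Nat) : Int) = regOf (stepN n m) := by
  have h0 := comp_eq n m 0 hn hm (by norm_num)
  have h1 := comp_eq n m 1 hn hm (by norm_num)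
  have h2 := comp_eq n m 2 hn hm (by norm_num)
  have h3 := comp_eq n m 3 hn hm (by norm_num)
  have h4 := comp_eq n m 4 hn hm (by norm_num)
  have h5 := comp_eq n m 5 hn hm (by norm_num)
  simp only [pvGenSymsB, List.getD_cons_zero, List.getD_cons_succ] at h0 h1 h2 h3 h4 h5
  norm_num at h0 h1 h2 h3 h4 h5
  unfold pvGfStep regOf pvGenSymsB
  simp only [PySem.List.slice_from_one, List.tail_cons, PySem.List.pyGetD_zero_cons,
    List.cons_append, List.nil_append, List.zip_cons_cons, List.zip_nil_right, List.map_cons, List.map_nil]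
  rw [h0, h1, h2, h3, h4, h5]

-- the packed fold (A) and the register fold (B) track each other on 5-bit values
lemma polymod_both (vs : List Int) (h : ∀ v ∈ vs, 0 ≤ v ∧ v ≤ 31) :
    ∀ n : Nat, n < 2 ^ 30 → ∃ r : Nat, r < 2 ^ 30 ∧
      vs.foldl (fun chk v =>
          (List.range 5).foldl
            (fun (c : Int) (i : Nat) => if PySem.Int.band ((chk >>> (25 : Nat)) >>> i) 1 = 1 then PySem.Int.bxor c (PySem.List.pyGetD pvGENERATORS (i : Int) 0) else c)
            (PySem.Int.bxor ((PySem.Int.band chk 0x1FFFFFF) <<< (5 : Nat)) v)) ((n : Nat) : Int) = ((r : Nat) : Int) ∧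
      vs.foldl pvGfStep (regOf n) = regOf r := by
  induction vs with
  | nil => intro n hn; exact ⟨n, hn, rfl, rfl⟩
  | cons v vs ih =>
    intro n hn
    obtain ⟨hv0, hv31⟩ := h v (List.mem_cons_self ..)
    have hvm : v = ((v.toNat : Nat) : Int) := (Int.toNat_of_nonneg hv0).symm
    have hm : v.toNat ≤ 31 := by omega
    obtain ⟨hn', hA⟩ := stepA_eq n v.toNat hn hm
    have hB := stepB_eq n v.toNat hn (by omega)
    obtain ⟨r, hr, hA2, hB2⟩ := ih (fun x hx => h x (List.mem_cons_of_mem _ hx)) (stepN n v.toNat) hn'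
    refine ⟨r, hr, ?_, ?_⟩
    · simp only [List.foldl_cons]
      rw [hvm, hA, hA2]
    · simp only [List.foldl_cons]
      rw [hvm, hB, hB2]

lemma lowerChar_le (c : Char) (h : c.toNat ≤ 126) : (PySem.Chars.lowerChar c).toNat ≤ 1023 := by
  unfold PySem.Chars.lowerChar
  split
  · rw [Char.toNat_ofNat, if_pos (Or.inl (by omega : c.toNat + 32 < 0xd800))]
    omega
  · omega

lemma lower_chars (s : List Char) (h : ∀ c ∈ s, c.toNat ≤ 126) :
    ∀ c ∈ PySem.Chars.lower s, c.toNat ≤ 1023 := by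
  intro c hc
  obtain ⟨c', hc', rfl⟩ := List.mem_map.mp hc
  exact lowerChar_le c' (h c' hc')

lemma values_range (hl : List Char) (data : List Int)
    (hc : ∀ c ∈ hl, c.toNat ≤ 1023) (hd : ∀ d ∈ data, 0 ≤ d ∧ d ≤ 31) :
    ∀ v ∈ (hl.map (fun x => ((x.toNat : Int)) >>> (5 : Nat)) ++ [(0 : Int)] ++ hl.map (fun x => PySem.Int.band (x.toNat : Int) 31)) ++ data ++ ([0, 0, 0, 0, 0, 0] : List Int),
      0 ≤ v ∧ v ≤ 31 := by
  intro v hv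
  simp only [List.mem_append, List.mem_map, List.mem_cons, List.not_mem_nil, or_false] at hv
  rcases hv with (((⟨c, hcm, rfl⟩ | rfl) | ⟨c, hcm, rfl⟩) | hvd) | (rfl | rfl | rfl | rfl | rfl | rfl)
  · rw [← Int.natCast_shiftRight]
    have := hc c hcm
    have hb : c.toNat >>> 5 ≤ 31 := by rw [Nat.shiftRight_eq_div_pow]; omega
    omega
  · omega
  · rw [show (31 : Int) = ((31 : Nat) : Int) from rfl, PySem.Int.band_natCast]
    have : c.toNat &&& 31 ≤ 31 := Nat.and_le_right
    omega
  · exact hd v hvd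
  all_goals omega

-- B's list of 5-bit values equals the one A's _create_checksum feeds to _polymod
lemma values_eq (hl : List Char) (data : List Int) :
    ((hl.map (fun c : Char => ((c.toNat : Int)))).map (fun b : Int => b >>> (5 : Nat))) ++ [(0 : Int)] ++ ((hl.map (fun c : Char => ((c.toNat : Int)))).map (fun b => PySem.Int.band b 31)) ++ data ++ List.replicate 6 (0 : Int)
      = (hl.map (fun x => ((x.toNat : Int)) >>> (5 : Nat)) ++ [(0 : Int)] ++ hl.map (fun x => PySem.Int.band (x.toNat : Int) 31)) ++ data ++ ([0, 0, 0, 0, 0, 0] : List Int) := by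
  simp [List.map_map, Function.comp_def, List.append_assoc, List.replicate]

-- one checksum character position: A's packed extraction equals B's register XOR
lemma csum_comp (r cN s : Nat) :
    PySem.Int.band ((((r ^^^ cN : Nat)) : Int) >>> s) 31
      = PySem.Int.bxor ((((r >>> s) &&& 31 : Nat) : Int)) (PySem.Int.band (((cN : Nat) : Int) >>> s) 31) := by
  rw [← Int.natCast_shiftRight, ← Int.natCast_shiftRight,
      show (31 : Int) = ((31 : Nat) : Int) from rfl, PySem.Int.band_natCast, PySem.Int.band_natCast,
      PySem.Int.bxor_natCast, chunk_xor]

lemma csum_comp0 (r cN : Nat) :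
    PySem.Int.band (((r ^^^ cN : Nat)) : Int) 31
      = PySem.Int.bxor (((r &&& 31 : Nat) : Int)) (PySem.Int.band (((cN : Nat) : Int)) 31) := by
  have h := csum_comp r cN 0
  simpa using h

-- the two checksum lists agree
lemma csum_eq (r cN : Nat) :
    (List.range 6).map (fun i => PySem.Int.band ((PySem.Int.bxor ((r : Nat) : Int) ((cN : Nat) : Int)) >>> ((5 * (5 - i) : Nat))) 31)
      = (PySem.List.enumerate (regOf r) 0).map
          (fun ir => PySem.Int.bxor ir.2 (PySem.Int.band (((cN : Nat) : Int) >>> ((5 * (5 - ir.1)).toNat)) 31)) := by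
  rw [show List.range 6 = [0, 1, 2, 3, 4, 5] from rfl]
  simp only [regOf, PySem.List.enumerate_cons, PySem.List.enumerate_nil, List.map_cons, List.map_nil]
  norm_num [symN, csum_comp, csum_comp0]
  exact ⟨rfl, rfl, rfl, rfl, rfl, by rfl⟩

-- ===== VERDICT (by name: the statement is the Claim_ definition above) =====
theorem bech32_encode_spec : Claim_equal_bech32_encode := by
  intro hrp data spec hdom hpre
  obtain ⟨h1, h2b, h3b, h4⟩ := hpre
  have h2 : ∀ c ∈ hrp.toList, 33 ≤ c.toNat ∧ c.toNat ≤ 126 := by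
    intro c hc
    have := List.all_eq_true.mp h2b c hc
    simpa using this
  have h3 : ∀ d ∈ data, 0 ≤ d ∧ d ≤ 31 := by
    intro d hd
    have := List.all_eq_true.mp h3b d hd
    simpa using this
  unfold Spec_bech32_encode bech32_encode bech32_encode_alt
  have hg1 : ¬(hrp.toList = [] ∨ hrp.toList.any (fun c => decide (c.toNat < 33) || decide (126 < c.toNat)) = true) := by
    rintro (h | h)
    · exact h1 h
    · obtain ⟨c, hc, hb⟩ := List.any_eq_true.mp h
      obtain ⟨hcl, hcu⟩ := h2 c hc
      simp only [Bool.or_eq_true, decide_eq_true_eq] at hb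
      omega
  have hg2 : ¬(data.any (fun d => decide (d < 0) || decide (31 < d)) = true) := by
    intro h
    obtain ⟨d, hd, hb⟩ := List.any_eq_true.mp h
    obtain ⟨h5, h6⟩ := h3 d hd
    simp only [Bool.or_eq_true, decide_eq_true_eq] at hb
    omega
  rw [if_neg hg1, if_neg hg2, if_neg (not_not_intro h4), if_neg hg1, if_neg hg2, if_neg (not_not_intro h4)]
  have hlchars : ∀ c ∈ (PySem.Str.lower hrp).toList, c.toNat ≤ 1023 := by
    rw [PySem.Str.toList_lower]
    exact lower_chars _ (fun c hc => (h2 c hc).2)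
  obtain ⟨r, hr, hA, hB⟩ := polymod_both _ (values_range (PySem.Str.lower hrp).toList data hlchars h3) 1 (by norm_num)
  simp only [pvCreateChecksum, pvHrpExpand, pvPolymod, pvPolymodGf]
  rw [values_eq]
  have hreg1 : regOf 1 = [0, 0, 0, 0, 0, 1] := by decide
  simp only [Nat.cast_one] at hA hB
  rw [hA, ← hreg1, hB]
  have hconst : (if spec = "bech32m" then (0x2BC830A3 : Int) else 1) = (((if spec = "bech32m" then (0x2BC830A3 : Nat) else 1) : Nat) : Int) := by
    split <;> rfl
  simp only [decide_eq_true_eq]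
  rw [hconst, csum_eq]
  simp [show pvCharsetB = pvCharsetL from rfl]
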